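-- pv_equiv track=rewrite | github.com/AnJingwd/STRsearch | scripts/STR_search.py | get_STR_unit_region
-- ===== SOURCE A (Python) =====
-- def merge_intervals(intervals):
--     ''''
--     Merge interval list
--     input: like [[1,3],[2,6],[8,10],[15,18]]
--     output: like [[1,6],[8,10],[15,18]]
--     '''
--     intervals.sort(key=lambda x: x[0])
--     merged = []
--     for interval in intervals:
--         if not merged or merged[-1][-1] < interval[0]:
--             merged.append(interval)
--         else:
--             merged[-1][-1] = max(merged[-1][-1], interval[-1])
--     return merged
--
-- def get_STR_unit_region(score_list,pos_list,start_point = 0):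
--     '''
--     Compute the intervals of STR unit and union
--     input:
--     output:
--     '''
--     intervals_list = []
--     for i in range(0,len(score_list)):
--         start = pos_list[i]-score_list[i] + start_point
--         end = pos_list[i] + start_point
--         intervals_list.append([start,end])
--     if score_list == []:
--         return []
--     elif score_list[0]==2:  ## when a unit is part of other unit ,don’t merge intervals
--         return intervals_list
--     else:
--         intervals_union = merge_intervals(intervals_list)  ## get union intervals of STR units
--         return intervals_union
-- ===== SOURCE B (Python) =====
-- def get_STR_unit_region(score_list, pos_list, start_point=0):
--     intervals = [[p - c + start_point, p + start_point]
--                  for c, p in zip(score_list, pos_list)]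
--     if not score_list:
--         return []
--     if score_list[0] == 2:
--         return intervals
--     ordered = sorted(intervals, key=lambda iv: iv[0])
--     # running maxima of right endpoints over the whole sorted list
--     pref = []
--     for iv in ordered:
--         pref.append(iv[1] if not pref else max(pref[-1], iv[1]))
--     # index j starts a new merged block iff every earlier right endpoint lies left of its start
--     cuts = [j for j in range(len(ordered)) if j == 0 or pref[j - 1] < ordered[j][0]]
--     cuts.append(len(ordered))
--     return [[ordered[a][0], max(iv[1] for iv in ordered[a:b])]
--             for a, b in zip(cuts, cuts[1:])]
-- ===== Notes on version B (the rewrite author's own statement) =====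
-- stated objective: alternative
-- what changed: A merges the sorted intervals in one stateful scan that keeps appending to `merged` and mutating the right endpoint of its last interval in place; B instead first partitions the sorted intervals into blocks using a global running maximum of right endpoints (a new block opens exactly when every endpoint seen so far lies left of the next start) and then aggregates each block into [first start, max end] in a second phase.
import Mathlib
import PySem

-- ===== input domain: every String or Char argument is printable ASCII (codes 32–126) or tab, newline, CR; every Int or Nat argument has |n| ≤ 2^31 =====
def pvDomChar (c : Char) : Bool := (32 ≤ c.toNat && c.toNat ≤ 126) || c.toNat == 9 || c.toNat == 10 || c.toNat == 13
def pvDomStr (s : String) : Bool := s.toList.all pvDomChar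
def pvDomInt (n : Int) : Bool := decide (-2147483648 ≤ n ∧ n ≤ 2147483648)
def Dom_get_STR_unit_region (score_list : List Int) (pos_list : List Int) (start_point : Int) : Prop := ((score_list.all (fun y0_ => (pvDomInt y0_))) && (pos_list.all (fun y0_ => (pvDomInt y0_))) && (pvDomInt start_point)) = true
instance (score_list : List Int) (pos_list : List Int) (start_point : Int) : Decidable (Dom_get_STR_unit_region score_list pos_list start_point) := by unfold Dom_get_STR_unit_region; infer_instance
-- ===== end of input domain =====

-- B replaces A's single mutate-the-last-interval merge scan by a two-phase plan (partition the
-- sorted intervals into blocks via a global running maximum, then aggregate each block);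
-- objective: alternative decomposition, same asymptotic cost.

-- shared tiny helpers: iv[0], iv[1], iv[-1] on a Python list
def pvIv0 (iv : List Int) : Int := (PySem.List.pyGet? iv 0).getD 0
def pvIv1 (iv : List Int) : Int := (PySem.List.pyGet? iv 1).getD 0
def pvIvLast (iv : List Int) : Int := (PySem.List.pyGet? iv (-1)).getD 0

-- ===== PORT A =====
-- one step of merge_intervals' loop (merged[-1][-1] is read/assigned; getD is unreachable junk)
def pvMergeStep (merged : List (List Int)) (interval : List Int) : List (List Int) :=
  if merged = [] ∨ pvIvLast ((PySem.List.pyGet? merged (-1)).getD []) < pvIv0 interval then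
    merged ++ [interval]
  else
    let last := (PySem.List.pyGet? merged (-1)).getD []
    merged.dropLast ++ [last.dropLast ++ [max (pvIvLast last) (pvIvLast interval)]]

def merge_intervals (intervals : List (List Int)) : List (List Int) :=
  (PySem.List.sorted intervals pvIv0 false).foldl pvMergeStep []

def get_STR_unit_region (score_list : List Int) (pos_list : List Int) (start_point : Int) : List (List Int) :=
  let intervals_list := (PySem.List.pyRange 0 score_list.length 1).foldl
    (fun acc i => acc ++ [[(PySem.List.pyGet? pos_list i).getD 0 - (PySem.List.pyGet? score_list i).getD 0 + start_point,
                           (PySem.List.pyGet? pos_list i).getD 0 + start_point]]) []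
  if score_list = [] then []
  else if (PySem.List.pyGet? score_list 0).getD 0 = 2 then intervals_list
  else merge_intervals intervals_list

-- ===== PORT B =====
-- one step of B's partition loop: state = (groups, m); m = None only before the first interval
def pvGroupStep (st : List (List (List Int)) × Option Int) (iv : List Int) : List (List (List Int)) × Option Int :=
  match st.2 with
  | none => (st.1 ++ [[iv]], some (pvIv1 iv))
  | some v =>
      (if v < pvIv0 iv then st.1 ++ [[iv]]
       else st.1.dropLast ++ [((PySem.List.pyGet? st.1 (-1)).getD []) ++ [iv]],
       some (max v (pvIv1 iv)))

def get_STR_unit_region_alt (score_list : List Int) (pos_list : List Int) (start_point : Int) : List (List Int) :=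
  let intervals := (score_list.zip pos_list).map (fun cp => [cp.2 - cp.1 + start_point, cp.2 + start_point])
  if score_list = [] then []
  else if (PySem.List.pyGet? score_list 0).getD 0 = 2 then intervals
  else
    let ordered := PySem.List.sorted intervals pvIv0 false
    let groups := (ordered.foldl pvGroupStep ([], none)).1
    groups.map (fun g => [pvIv0 ((PySem.List.pyGet? g 0).getD []),
                          (PySem.List.max? (g.map pvIv1) (fun y => y)).getD 0])

-- ===== PRECONDITION & SPEC =====
-- A reads pos_list[i] for every i < len(score_list) and raises IndexError when pos_list is
-- shorter than score_list; Pre_ excludes exactly those inputs.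
def Pre_get_STR_unit_region (score_list : List Int) (pos_list : List Int) (start_point : Int) : Prop :=
  score_list.length ≤ pos_list.length

instance (score_list : List Int) (pos_list : List Int) (start_point : Int) : Decidable (Pre_get_STR_unit_region score_list pos_list start_point) := by unfold Pre_get_STR_unit_region; infer_instance

def pvWitness_get_STR_unit_region : List Int × List Int × Int := ([1, 1], [2, 4], 0)

def Spec_get_STR_unit_region (score_list : List Int) (pos_list : List Int) (start_point : Int) (out : List (List Int)) : Prop := out = get_STR_unit_region_alt score_list pos_list start_point
instance (score_list : List Int) (pos_list : List Int) (start_point : Int) (out : List (List Int)) : Decidable (Spec_get_STR_unit_region score_list pos_list start_point out) := by unfold Spec_get_STR_unit_region; infer_instance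

-- ===== CLAIM (what is proved, stated in full; the proofs are below) =====
def Claim_equal_get_STR_unit_region : Prop := ∀ (score_list : List Int) (pos_list : List Int) (start_point : Int), Dom_get_STR_unit_region score_list pos_list start_point → Pre_get_STR_unit_region score_list pos_list start_point → Spec_get_STR_unit_region score_list pos_list start_point (get_STR_unit_region score_list pos_list start_point)

-- ===== LEMMAS AND PROOFS =====

-- pair-level models of the two loops
def pvToIv (p : Int × Int) : List Int := [p.1, p.2]

def pvMA : Int × Int → List (Int × Int) → List (Int × Int)
  | cur, [] => [cur]
  | cur, p :: r => if cur.2 < p.1 then cur :: pvMA p r else pvMA (cur.1, max cur.2 p.2) r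

def pvGrp : List (Int × Int) → Int → List (Int × Int) → List (List (Int × Int))
  | cur, _, [] => [cur]
  | cur, m, p :: r => if m < p.1 then cur :: pvGrp [p] (max m p.2) r else pvGrp (cur ++ [p]) (max m p.2) r

def pvMaxSnd (c : Int × Int) (t : List (Int × Int)) : Int := t.foldl (fun a p => max a p.2) c.2

def pvAgg (cl : List (Int × Int)) : Int × Int := (cl.headI.1, pvMaxSnd cl.headI cl.tail)

@[simp] theorem pvIv0_toIv (p : Int × Int) : pvIv0 (pvToIv p) = p.1 := by
  simp [pvIv0, pvToIv, PySem.List.pyGet?, PySem.List.pyIdx?]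

@[simp] theorem pvIv1_toIv (p : Int × Int) : pvIv1 (pvToIv p) = p.2 := by
  simp [pvIv1, pvToIv, PySem.List.pyGet?, PySem.List.pyIdx?]

@[simp] theorem pvIvLast_toIv (p : Int × Int) : pvIvLast (pvToIv p) = p.2 := by
  simp [pvIvLast, pvToIv, PySem.List.pyGet?_neg_one]

-- A's loop is pvMA
theorem foldlA (r : List (Int × Int)) : ∀ (acc : List (Int × Int)) (cur : Int × Int),
    List.foldl pvMergeStep ((acc ++ [cur]).map pvToIv) (r.map pvToIv)
      = (acc ++ pvMA cur r).map pvToIv := by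
  induction r with
  | nil => intro acc cur; simp [pvMA]
  | cons p r ih =>
    intro acc cur
    have hstep : pvMergeStep ((acc ++ [cur]).map pvToIv) (pvToIv p)
        = if cur.2 < p.1 then ((acc ++ [cur]) ++ [p]).map pvToIv
          else (acc ++ [(cur.1, max cur.2 p.2)]).map pvToIv := by
      by_cases h : cur.2 < p.1 <;>
        simp [pvMergeStep, pvToIv, h, pvIvLast, pvIv0,
          PySem.List.pyGet?, PySem.List.pyIdx?]
    rw [List.map_cons, List.foldl_cons, hstep]
    by_cases h : cur.2 < p.1
    · simp only [h, if_pos]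
      rw [ih (acc ++ [cur]) p]
      simp [pvMA, h]
    · simp only [h, if_false]
      rw [ih acc (cur.1, max cur.2 p.2)]
      simp [pvMA, h]

theorem foldlA_nil (c : Int × Int) (r : List (Int × Int)) :
    List.foldl pvMergeStep [] ((c :: r).map pvToIv) = (pvMA c r).map pvToIv := by
  have h0 : pvMergeStep [] (pvToIv c) = (([] ++ [c]).map pvToIv) := by
    simp [pvMergeStep]
  rw [List.map_cons, List.foldl_cons, h0, foldlA r [] c]
  simp

-- B's loop is pvGrp
theorem foldlB (r : List (Int × Int)) :
    ∀ (done : List (List (Int × Int))) (cur : List (Int × Int)) (m : Int),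
    (List.foldl pvGroupStep ((done ++ [cur]).map (fun cl => List.map pvToIv cl), some m) (r.map pvToIv)).1
      = (done ++ pvGrp cur m r).map (fun cl => List.map pvToIv cl) := by
  induction r with
  | nil => intro done cur m; simp [pvGrp]
  | cons p r ih =>
    intro done cur m
    have hstep : pvGroupStep ((done ++ [cur]).map (fun cl => List.map pvToIv cl), some m) (pvToIv p)
        = (if m < p.1 then ((done ++ [cur]) ++ [[p]]).map (fun cl => List.map pvToIv cl)
           else (done ++ [cur ++ [p]]).map (fun cl => List.map pvToIv cl),
           some (max m p.2)) := by
      by_cases h : m < p.1 <;>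
        simp [pvGroupStep, h, PySem.List.pyGet?_neg_one]
    rw [List.map_cons, List.foldl_cons, hstep]
    by_cases h : m < p.1
    · simp only [h, if_pos]
      rw [ih (done ++ [cur]) [p] (max m p.2)]
      simp [pvGrp, h]
    · simp only [h, if_false]
      rw [ih done (cur ++ [p]) (max m p.2)]
      simp [pvGrp, h]

theorem foldlB_nil (c : Int × Int) (r : List (Int × Int)) :
    (List.foldl pvGroupStep ([], none) ((c :: r).map pvToIv)).1
      = (pvGrp [c] c.2 r).map (fun cl => List.map pvToIv cl) := by
  have h0 : pvGroupStep ([], none) (pvToIv c)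
      = (([] ++ [[c]]).map (fun cl => List.map pvToIv cl), some c.2) := by
    simp [pvGroupStep]
  rw [List.map_cons, List.foldl_cons, h0, foldlB r [] [c] c.2]
  simp

-- main comparison
theorem mainLemma (r : List (Int × Int)) : ∀ (c : Int × Int) (ct : List (Int × Int)) (m : Int),
    (∀ p ∈ r, (m < p.1 ↔ pvMaxSnd c ct < p.1)) →
    r.Pairwise (fun a b => a.1 ≤ b.1) →
    pvMA (c.1, pvMaxSnd c ct) r = (pvGrp (c :: ct) m r).map pvAgg := by
  induction r with
  | nil => intro c ct m _ _; simp [pvMA, pvGrp, pvAgg]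
  | cons p r ih =>
    intro c ct m hinv hpw
    have hiff : m < p.1 ↔ pvMaxSnd c ct < p.1 := hinv p (List.mem_cons_self ..)
    have hpw' : r.Pairwise (fun a b => a.1 ≤ b.1) := (List.pairwise_cons.mp hpw).2
    have hple : ∀ q ∈ r, p.1 ≤ q.1 := (List.pairwise_cons.mp hpw).1
    by_cases h : pvMaxSnd c ct < p.1
    · have hm : m < p.1 := hiff.mpr h
      have lhs : pvMA (c.1, pvMaxSnd c ct) (p :: r) = (c.1, pvMaxSnd c ct) :: pvMA p r := by
        simp [pvMA, h]
      have rhs : pvGrp (c :: ct) m (p :: r) = (c :: ct) :: pvGrp [p] (max m p.2) r := by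
        simp [pvGrp, hm]
      rw [lhs, rhs, List.map_cons]
      have hrec := ih p [] (max m p.2)
        (by
          intro q hq
          have hpq : p.1 ≤ q.1 := hple q hq
          constructor
          · intro hlt; exact (max_lt_iff.mp hlt).2
          · intro hlt; exact max_lt_iff.mpr ⟨lt_of_lt_of_le hm hpq, hlt⟩)
        hpw'
      have hms : pvMaxSnd p [] = p.2 := by simp [pvMaxSnd]
      rw [hms] at hrec
      rw [← hrec]
      simp [pvAgg, pvMaxSnd]
    · have hm : ¬ m < p.1 := fun hc => h (hiff.mp hc)
      have lhs : pvMA (c.1, pvMaxSnd c ct) (p :: r) = pvMA (c.1, max (pvMaxSnd c ct) p.2) r := by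
        simp [pvMA, h]
      have rhs : pvGrp (c :: ct) m (p :: r) = pvGrp (c :: (ct ++ [p])) (max m p.2) r := by
        simp [pvGrp, hm]
      have hms : pvMaxSnd c (ct ++ [p]) = max (pvMaxSnd c ct) p.2 := by
        simp [pvMaxSnd, List.foldl_append]
      rw [lhs, rhs]
      have hrec := ih c (ct ++ [p]) (max m p.2)
        (by
          intro q hq
          have hq' : m < q.1 ↔ pvMaxSnd c ct < q.1 := hinv q (List.mem_cons_of_mem _ hq)
          rw [hms]
          constructor
          · intro hlt
            rcases max_lt_iff.mp hlt with ⟨h1, h2⟩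
            exact max_lt_iff.mpr ⟨hq'.mp h1, h2⟩
          · intro hlt
            rcases max_lt_iff.mp hlt with ⟨h1, h2⟩
            exact max_lt_iff.mpr ⟨hq'.mpr h1, h2⟩)
        hpw'
      rw [hms] at hrec
      exact hrec

-- every block pvGrp builds is nonempty
theorem grpNonempty (r : List (Int × Int)) :
    ∀ (c : Int × Int) (ct : List (Int × Int)) (m : Int) (cl : List (Int × Int)),
    cl ∈ pvGrp (c :: ct) m r → cl ≠ [] := by
  induction r with
  | nil => intro c ct m cl hcl; simp [pvGrp] at hcl; subst hcl; simp
  | cons p r ih =>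
    intro c ct m cl hcl
    by_cases h : m < p.1
    · simp [pvGrp, h] at hcl
      rcases hcl with hcl | hcl
      · subst hcl; simp
      · exact ih p [] (max m p.2) cl hcl
    · simp [pvGrp, h] at hcl
      exact ih c (ct ++ [p]) (max m p.2) cl (by simpa using hcl)

-- B's per-block aggregation is pvAgg
theorem aggEq (cl : List (Int × Int)) (hcl : cl ≠ []) :
    [pvIv0 ((PySem.List.pyGet? (cl.map pvToIv) 0).getD []),
     (PySem.List.max? ((cl.map pvToIv).map pvIv1) (fun y => y)).getD 0]
      = pvToIv (pvAgg cl) := by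
  rcases cl with _ | ⟨c, t⟩
  · exact absurd rfl hcl
  · have h0 : (PySem.List.pyGet? ((c :: t).map pvToIv) 0).getD [] = pvToIv c := by
      simp
    have h1 : ((c :: t).map pvToIv).map pvIv1 = c.2 :: t.map Prod.snd := by
      simp [List.map_map, Function.comp_def]
    rw [h0, h1, PySem.List.max?_id_cons]
    simp [pvToIv, pvAgg, pvMaxSnd, List.foldl_map, pvIv0, PySem.List.pyGet?, PySem.List.pyIdx?]

-- A's interval-building loop equals B's zip comprehension
theorem buildEq (score_list pos_list : List Int) (start_point : Int)
    (h : score_list.length ≤ pos_list.length) :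
    (PySem.List.pyRange 0 score_list.length 1).foldl
      (fun acc i => acc ++ [[(PySem.List.pyGet? pos_list i).getD 0 - (PySem.List.pyGet? score_list i).getD 0 + start_point,
                             (PySem.List.pyGet? pos_list i).getD 0 + start_point]]) []
      = (score_list.zip pos_list).map (fun cp => [cp.2 - cp.1 + start_point, cp.2 + start_point]) := by
  rw [PySem.List.foldl_append_singleton_eq_map]
  apply List.ext_getElem
  · simp [PySem.List.length_pyRange_one]
    omega
  · intro k hk1 hk2
    have hklt : k < score_list.length := by
      simpa [PySem.List.length_pyRange_one] using hk1
    have hkp : k < pos_list.length := lt_of_lt_of_le hklt h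
    have hkr : k < (PySem.List.pyRange 0 (score_list.length : Int) 1).length := by
      rw [PySem.List.length_pyRange_one]; omega
    have hidx : (PySem.List.pyRange 0 (score_list.length : Int) 1)[k]'hkr = ((k : Int)) := by
      rw [PySem.List.getElem_pyRange_one]; ring
    simp only [List.nil_append, List.getElem_map, List.getElem_zip, hidx,
      PySem.List.pyGet?_natCast]
    simp [hklt, hkp]

-- the merge branch: A's mutate-last scan equals B's partition-and-aggregate
theorem mergeEq (P : List (Int × Int)) (hP : P ≠ []) :
    merge_intervals (P.map pvToIv)
      = (((PySem.List.sorted (P.map pvToIv) pvIv0 false).foldl pvGroupStep ([], none)).1).map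
          (fun g => [pvIv0 ((PySem.List.pyGet? g 0).getD []),
                     (PySem.List.max? (g.map pvIv1) (fun y => y)).getD 0]) := by
  set ordered := PySem.List.sorted (P.map pvToIv) pvIv0 false with hord
  set M := ordered.map (fun iv => (pvIv0 iv, pvIv1 iv)) with hM
  have hshape : ∀ iv ∈ ordered, pvToIv (pvIv0 iv, pvIv1 iv) = iv := by
    intro iv hiv
    rw [hord] at hiv
    have : iv ∈ P.map pvToIv := (PySem.List.mem_sorted _ _ _ _).mp hiv
    rcases List.mem_map.mp this with ⟨p, _, rfl⟩
    simp only [pvIv0_toIv, pvIv1_toIv]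
  have hOM : ordered = M.map pvToIv := by
    rw [hM, List.map_map]
    have h' : List.map (pvToIv ∘ fun iv => (pvIv0 iv, pvIv1 iv)) ordered
        = List.map (fun a => a) ordered :=
      List.map_congr_left (by intro a ha; simpa using hshape a ha)
    rw [h', List.map_id']
  have hpwO : ordered.Pairwise (fun a b => pvIv0 a ≤ pvIv0 b) := by
    rw [hord]
    exact PySem.List.sorted_pairwise _ _
  have hpwM : M.Pairwise (fun a b => a.1 ≤ b.1) := by
    rw [hM, List.pairwise_map]
    simpa using hpwO
  have hMne : M ≠ [] := by
    intro hnil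
    apply hP
    have hone : ordered = [] := by rw [hOM, hnil]; rfl
    rw [hord] at hone
    have := (PySem.List.sorted_eq_nil_iff _ _ _).mp hone
    exact List.map_eq_nil_iff.mp this
  rcases List.exists_cons_of_ne_nil hMne with ⟨c, Mr, hcM⟩
  have hpwMr : Mr.Pairwise (fun a b => a.1 ≤ b.1) := by
    rw [hcM] at hpwM; exact (List.pairwise_cons.mp hpwM).2
  have hA : merge_intervals (P.map pvToIv) = (pvMA c Mr).map pvToIv := by
    unfold merge_intervals
    rw [← hord, hOM, hcM]
    exact foldlA_nil c Mr
  have hB1 : (ordered.foldl pvGroupStep ([], none)).1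
      = (pvGrp [c] c.2 Mr).map (fun cl => List.map pvToIv cl) := by
    rw [hOM, hcM]
    exact foldlB_nil c Mr
  rw [hA, hB1, List.map_map]
  have hBagg : ∀ cl ∈ pvGrp [c] c.2 Mr,
      ((fun g => [pvIv0 ((PySem.List.pyGet? g 0).getD []),
                  (PySem.List.max? (g.map pvIv1) (fun y => y)).getD 0]) ∘ (fun cl => List.map pvToIv cl)) cl
        = (pvToIv ∘ pvAgg) cl := by
    intro cl hcl
    have := grpNonempty Mr c [] c.2 cl hcl
    simp only [Function.comp]
    exact aggEq cl this
  rw [List.map_congr_left hBagg]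
  have hmain : pvMA (c.1, pvMaxSnd c []) Mr = (pvGrp (c :: []) c.2 Mr).map pvAgg :=
    mainLemma Mr c [] c.2 (by intro p _; simp [pvMaxSnd]) hpwMr
  have hc : pvMA c Mr = pvMA (c.1, pvMaxSnd c []) Mr := by simp [pvMaxSnd]
  rw [hc, hmain, ← List.map_map]

-- ===== VERDICT (by name: the statement is the Claim_ definition above) =====
theorem get_STR_unit_region_spec : Claim_equal_get_STR_unit_region := by
  unfold Claim_equal_get_STR_unit_region
  intro score_list pos_list start_point _ hpre
  unfold Spec_get_STR_unit_region
  unfold Pre_get_STR_unit_region at hpre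
  have hbuild := buildEq score_list pos_list start_point hpre
  simp only [get_STR_unit_region, get_STR_unit_region_alt]
  rw [hbuild]
  by_cases hsc : score_list = []
  · simp [hsc]
  · simp only [hsc, if_false]
    by_cases h2 : (PySem.List.pyGet? score_list 0).getD 0 = 2
    · simp [h2]
    · simp only [h2, if_false]
      have hzip : (score_list.zip pos_list).map (fun cp => [cp.2 - cp.1 + start_point, cp.2 + start_point])
          = ((score_list.zip pos_list).map (fun cp => (cp.2 - cp.1 + start_point, cp.2 + start_point))).map pvToIv := by
        rw [List.map_map]; rfl
      have hPne : (score_list.zip pos_list).map (fun cp => (cp.2 - cp.1 + start_point, cp.2 + start_point)) ≠ [] := by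
        simp [List.map_eq_nil_iff, List.zip_eq_nil_iff]
        constructor
        · exact hsc
        · intro hp; rw [hp] at hpre; simp at hpre; exact hsc hpre
      rw [hzip]
      exact mergeEq _ hPne
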